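-- pv_equiv track=rewrite | github.com/JuliaRodi/lesson | module_9_6.py | all_variants
-- ===== SOURCE A (Python) =====
-- from itertools import combinations
--
-- def all_variants(text):
--     for i in range(1, len(text) + 1):
--         list_1 = []
--         b = combinations(text, i)
--         list_1.extend(b)
--         for j in list_1:
--             j = list(j)
--             yield (''.join(j))
-- ===== SOURCE B (Python) =====
-- def all_variants(text):
--     n = len(text)
--     buckets = [[] for _ in range(n + 1)]
--     for mask in range(2 ** n - 1, 0, -1):
--         s = []
--         c = 0
--         for j in range(n):
--             if (mask >> (n - 1 - j)) & 1:
--                 s.append(text[j])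
--                 c += 1
--         buckets[c].append(''.join(s))
--     for c in range(1, n + 1):
--         for s in buckets[c]:
--             yield s
-- ===== Notes on version B (the rewrite author's own statement) =====
-- stated objective: alternative
-- what changed: Replaces the per-length itertools.combinations generation with a single descending bitmask enumeration (bit k <-> character n-1-k) that buckets each subset string by its popcount; descending mask order makes every bucket come out in combinations' index-lexicographic order, and the buckets are emitted by length.
import Mathlib
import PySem

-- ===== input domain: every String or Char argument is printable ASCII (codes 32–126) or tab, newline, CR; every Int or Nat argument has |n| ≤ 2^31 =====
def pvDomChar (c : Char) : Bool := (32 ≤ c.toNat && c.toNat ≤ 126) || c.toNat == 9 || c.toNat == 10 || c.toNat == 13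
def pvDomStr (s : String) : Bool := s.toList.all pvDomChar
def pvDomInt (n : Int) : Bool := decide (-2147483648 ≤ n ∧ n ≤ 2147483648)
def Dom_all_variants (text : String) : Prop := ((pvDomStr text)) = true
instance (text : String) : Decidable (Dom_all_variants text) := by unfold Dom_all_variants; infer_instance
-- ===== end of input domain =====

-- B replaces the per-length itertools.combinations generation by one descending bitmask
-- enumeration bucketed by popcount; objective: alternative (no speed claim).
-- Both A and B are generators; the ports collect the yielded values in order into a list.

-- ===== PORT A =====
-- itertools.combinations(text, i), in its documented index-lexicographic order, as lists of chars
def combinations : Nat → List Char → List (List Char)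
  | 0, _ => [[]]
  | _ + 1, [] => []
  | k + 1, c :: rest => ((combinations k rest).map (fun t => c :: t)) ++ combinations (k + 1) rest

def all_variants (text : String) : List String :=
  -- for i in range(1, len(text)+1): both bounds nonnegative, so List.range' 1 len is exact
  (List.range' 1 text.length).foldl
    (fun acc i =>
      -- list_1 = []; b = combinations(text, i); list_1.extend(b)
      let list_1 := combinations i text.toList
      -- for j in list_1: j = list(j); yield ''.join(j)
      acc ++ list_1.map (fun j => String.ofList j)) []

-- ===== PORT B =====
-- inner loop of Source B: for j in range(n): if (mask >> (n-1-j)) & 1: s.append(text[j]); c += 1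
-- text[j] with 0 ≤ j < n is exact as getD; state is the pair (s, c)
def bStep (cs : List Char) (n : Nat) (mask : Nat) : List Char × Nat :=
  (List.range n).foldl
    (fun sc j => if (mask >>> (n - 1 - j)) &&& 1 ≠ 0 then (sc.1 ++ [cs.getD j ' '], sc.2 + 1) else sc)
    ([], 0)

def all_variants_alt (text : String) : List String :=
  let cs := text.toList
  let n := cs.length
  -- buckets = [[] for _ in range(n+1)]
  -- for mask in range(2**n - 1, 0, -1): masks are the nonneg list [2^n-1, ..., 1]
  let buckets := ((List.range (2 ^ n - 1)).map (fun k => 2 ^ n - 1 - k)).foldl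
    (fun b mask =>
      let sc := bStep cs n mask
      -- buckets[c].append(''.join(s))
      b.modify sc.2 (fun l => l ++ [String.ofList sc.1]))
    (List.replicate (n + 1) [])
  -- for c in range(1, n+1): yield from buckets[c]
  (List.range' 1 n).foldl (fun acc c => acc ++ buckets.getD c []) []

-- ===== PRECONDITION & SPEC =====
def Spec_all_variants (text : String) (out : List String) : Prop := out = all_variants_alt text
instance (text : String) (out : List String) : Decidable (Spec_all_variants text out) := by unfold Spec_all_variants; infer_instance

-- ===== CLAIM (what is proved, stated in full; the proofs are below) =====
def Claim_equal_all_variants : Prop := ∀ (text : String), Dom_all_variants text → Spec_all_variants text (all_variants text)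

-- ===== LEMMAS AND PROOFS =====

-- the full descending mask stream [2^n-1, ..., 0] mapped through bStep
def bList (cs : List Char) : List (List Char × Nat) :=
  ((List.range (2 ^ cs.length)).map (fun k => 2 ^ cs.length - 1 - k)).map (bStep cs cs.length)

-- the entries of the stream whose count is j, in order
def select (j : Nat) (ps : List (List Char × Nat)) : List (List Char) :=
  ps.filterMap (fun sc => if sc.2 = j then some sc.1 else none)

lemma bfold_prefix (cs : List Char) (n mask : Nat) (l : List Nat) (s0 : List Char × Nat) :
    l.foldl (fun sc j => if (mask >>> (n - 1 - j)) &&& 1 ≠ 0 then (sc.1 ++ [cs.getD j ' '], sc.2 + 1) else sc) s0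
      = (s0.1 ++ (l.foldl (fun sc j => if (mask >>> (n - 1 - j)) &&& 1 ≠ 0 then (sc.1 ++ [cs.getD j ' '], sc.2 + 1) else sc) ([], 0)).1,
         s0.2 + (l.foldl (fun sc j => if (mask >>> (n - 1 - j)) &&& 1 ≠ 0 then (sc.1 ++ [cs.getD j ' '], sc.2 + 1) else sc) ([], 0)).2) := by
  induction l generalizing s0 with
  | nil => simp
  | cons x l ih =>
    simp only [List.foldl_cons]
    by_cases hx : (mask >>> (n - 1 - x)) &&& 1 ≠ 0
    · rw [if_pos hx, if_pos hx, ih, ih (([] ++ [cs.getD x ' '], 0 + 1) : List Char × Nat)]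
      simp [Nat.add_assoc]
    · rw [if_neg hx, if_neg hx]
      exact ih s0

lemma bStep_zero (cs : List Char) (n : Nat) : bStep cs n 0 = ([], 0) := by
  simp [bStep]

lemma bit_eq (mask m i : Nat) (h : i < m) :
    ((mask % 2 ^ m) >>> i) &&& 1 = (mask >>> i) &&& 1 := by
  have hb := Nat.testBit_mod_two_pow mask m i
  simp [Nat.testBit_eq_decide_div_mod_eq, h, Nat.shiftRight_eq_div_pow, Nat.and_one_is_mod] at hb ⊢
  omega

lemma bStep_cons' (c : Char) (cs : List Char) (m mask : Nat) :
    bStep (c :: cs) (m + 1) mask =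
      (if (mask >>> m) &&& 1 ≠ 0
       then (c :: (bStep cs m (mask % 2 ^ m)).1, (bStep cs m (mask % 2 ^ m)).2 + 1)
       else bStep cs m (mask % 2 ^ m)) := by
  unfold bStep
  rw [List.range_succ_eq_map, List.foldl_cons, List.foldl_map]
  simp only [Nat.add_sub_cancel, Nat.sub_zero, List.getD_cons_zero, List.getD_cons_succ,
    List.nil_append, Nat.succ_eq_add_one]
  have hcong : ∀ (sc : List Char × Nat) (j : Nat), j ∈ List.range m →
      (if (mask >>> (m - (j + 1))) &&& 1 ≠ 0 then (sc.1 ++ [cs.getD j ' '], sc.2 + 1) else sc)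
        = (if ((mask % 2 ^ m) >>> (m - 1 - j)) &&& 1 ≠ 0 then (sc.1 ++ [cs.getD j ' '], sc.2 + 1) else sc) := by
    intro sc j hj
    rw [List.mem_range] at hj
    rw [bit_eq mask m (m - 1 - j) (by omega)]
    have h2 : m - (j + 1) = m - 1 - j := by omega
    rw [h2]
  by_cases hm : (mask >>> m) &&& 1 ≠ 0
  · rw [if_pos hm, if_pos hm, PySem.List.foldl_congr_mem _ _ _ _ hcong, bfold_prefix]
    simp [Nat.add_comm]
  · rw [if_neg hm, if_neg hm, PySem.List.foldl_congr_mem _ _ _ _ hcong]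

lemma bList_cons (c : Char) (cs : List Char) :
    bList (c :: cs) = (bList cs).map (fun t => (c :: t.1, t.2 + 1)) ++ bList cs := by
  unfold bList
  have hlen : (c :: cs).length = cs.length + 1 := rfl
  rw [hlen]
  have hpow : 2 ^ (cs.length + 1) = 2 ^ cs.length + 2 ^ cs.length := by
    rw [pow_succ]; omega
  rw [hpow, List.range_add, List.map_append, List.map_append]
  simp only [List.map_map]
  congr 1
  · apply List.map_congr_left
    intro k hk
    rw [List.mem_range] at hk
    have hmask : 2 ^ cs.length + 2 ^ cs.length - 1 - k = 2 ^ cs.length + (2 ^ cs.length - 1 - k) := by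
      omega
    simp only [Function.comp_apply]
    rw [hmask, bStep_cons']
    have hr : 2 ^ cs.length - 1 - k < 2 ^ cs.length := by
      have := Nat.two_pow_pos cs.length
      omega
    have hmod : (2 ^ cs.length + (2 ^ cs.length - 1 - k)) % 2 ^ cs.length = 2 ^ cs.length - 1 - k := by
      rw [Nat.add_mod_left, Nat.mod_eq_of_lt hr]
    have hdiv : (2 ^ cs.length + (2 ^ cs.length - 1 - k)) >>> cs.length &&& 1 = 1 := by
      rw [Nat.shiftRight_eq_div_pow, Nat.add_comm, Nat.add_div_right _ (Nat.two_pow_pos cs.length),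
        Nat.div_eq_of_lt hr, Nat.and_one_is_mod]
    rw [hmod, hdiv]
    simp
  · apply List.map_congr_left
    intro k hk
    rw [List.mem_range] at hk
    simp only [Function.comp_apply]
    rw [bStep_cons']
    have hr : 2 ^ cs.length + 2 ^ cs.length - 1 - (2 ^ cs.length + k) = 2 ^ cs.length - 1 - k := by
      omega
    rw [hr]
    have hrlt : 2 ^ cs.length - 1 - k < 2 ^ cs.length := by
      have := Nat.two_pow_pos cs.length
      omega
    have hdiv : (2 ^ cs.length - 1 - k) >>> cs.length &&& 1 = 0 := by
      rw [Nat.shiftRight_eq_div_pow, Nat.div_eq_of_lt hrlt]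
      rfl
    rw [Nat.mod_eq_of_lt hrlt, hdiv]
    simp

lemma bList_nil : bList [] = [([], 0)] := by
  simp [bList, bStep]

lemma select_map_cons (c : Char) (j : Nat) (L : List (List Char × Nat)) :
    select j (L.map (fun t => (c :: t.1, t.2 + 1)))
      = match j with
        | 0 => []
        | j' + 1 => (select j' L).map (fun t => c :: t) := by
  induction L with
  | nil => cases j <;> simp [select]
  | cons t L ih =>
    cases j with
    | zero => simpa [select] using ih
    | succ j' =>
      by_cases ht : t.2 = j'
      · simp only [select, List.map_cons, List.filterMap_cons] at ih ⊢
        rw [if_pos (by omega : t.2 + 1 = j' + 1), if_pos ht]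
        simpa [select] using congrArg (List.cons (c :: t.1)) ih
      · simp only [select, List.map_cons, List.filterMap_cons] at ih ⊢
        rw [if_neg (by omega : ¬ t.2 + 1 = j' + 1), if_neg ht]
        exact ih

lemma bList_select (cs : List Char) (j : Nat) :
    select j (bList cs) = combinations j cs := by
  induction cs generalizing j with
  | nil =>
    rw [bList_nil]
    cases j <;> simp [select, combinations]
  | cons c cs ih =>
    rw [bList_cons]
    unfold select
    rw [List.filterMap_append]
    have h1 := select_map_cons c j (bList cs)
    cases j with
    | zero =>
      simp only [select] at h1 ih
      rw [h1, List.nil_append, ih 0]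
      simp [combinations]
    | succ j' =>
      simp only [select] at h1 ih
      rw [h1, ih j', ih (j' + 1)]
      rfl

-- bucket accumulation: the j-th bucket collects, in order, the strings whose count is j

lemma foldB_getD (ps : List (List Char × Nat)) (init : List (List String)) (j : Nat)
    (hj : j < init.length) (hc : ∀ sc ∈ ps, sc.2 < init.length) :
    ((ps.foldl (fun b sc => b.modify sc.2 (fun l => l ++ [String.ofList sc.1])) init).getD j [])
      = init.getD j [] ++ (select j ps).map String.ofList := by
  induction ps generalizing init with
  | nil => simp [select]
  | cons sc ps ih =>
    simp only [List.foldl_cons]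
    rw [ih _ (by rw [List.length_modify]; exact hj)
        (fun t ht => by rw [List.length_modify]; exact hc t (List.mem_cons_of_mem _ ht))]
    by_cases h : sc.2 = j
    · subst h
      have hmod : (init.modify sc.2 (fun l => l ++ [String.ofList sc.1])).getD sc.2 []
          = init.getD sc.2 [] ++ [String.ofList sc.1] := by
        rw [List.getD_eq_getElem?_getD, List.getD_eq_getElem?_getD, List.getElem?_modify]
        rw [List.getElem?_eq_getElem hj]
        simp
      rw [hmod]
      simp [select]
    · have hmod : (init.modify sc.2 (fun l => l ++ [String.ofList sc.1])).getD j []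
          = init.getD j [] := by
        rw [List.getD_eq_getElem?_getD, List.getD_eq_getElem?_getD, List.getElem?_modify]
        cases init[j]? <;> simp [h]
      rw [hmod]
      simp [select, h]

lemma bStep_count_le (cs : List Char) (n mask : Nat) : (bStep cs n mask).2 ≤ n := by
  unfold bStep
  have : ∀ (l : List Nat) (s0 : List Char × Nat),
      (l.foldl (fun sc j => if (mask >>> (n - 1 - j)) &&& 1 ≠ 0 then (sc.1 ++ [cs.getD j ' '], sc.2 + 1) else sc) s0).2
        ≤ s0.2 + l.length := by
    intro l
    induction l with
    | nil => simp
    | cons x l ih =>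
      intro s0
      simp only [List.foldl_cons]
      by_cases hx : (mask >>> (n - 1 - x)) &&& 1 ≠ 0
      · rw [if_pos hx]
        have := ih (s0.1 ++ [cs.getD x ' '], s0.2 + 1)
        simp at this ⊢
        omega
      · rw [if_neg hx]
        have := ih s0
        simp at this ⊢
        omega
  have h := this (List.range n) ([], 0)
  simpa using h

-- ===== VERDICT (by name: the statement is the Claim_ definition above) =====
theorem all_variants_spec : Claim_equal_all_variants := by
  unfold Claim_equal_all_variants Spec_all_variants
  intro text _
  simp only [all_variants, all_variants_alt]
  rw [← String.length_toList]
  set cs := text.toList with hcs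
  set n := cs.length with hn
  set ps := (((List.range (2 ^ n - 1)).map (fun k => 2 ^ n - 1 - k)).map (bStep cs n)) with hps
  -- rewrite the bucket fold as a fold over the bStep stream
  have hconv : ((List.range (2 ^ n - 1)).map (fun k => 2 ^ n - 1 - k)).foldl
      (fun (b : List (List String)) mask =>
        b.modify (bStep cs n mask).2 (fun l => l ++ [String.ofList (bStep cs n mask).1]))
      (List.replicate (n + 1) [])
    = ps.foldl (fun b sc => b.modify sc.2 (fun l => l ++ [String.ofList sc.1]))
      (List.replicate (n + 1) []) := by
    rw [hps]
    simp only [List.foldl_map]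
  rw [hconv]
  have hsplit : bList cs = ps ++ [([], 0)] := by
    unfold bList
    rw [← hn]
    have h1 : 2 ^ n = 2 ^ n - 1 + 1 := by have := Nat.two_pow_pos n; omega
    rw [h1, List.range_succ, List.map_append, List.map_append]
    simp [bStep_zero, hps, List.map_map]
  have hsel : ∀ j : Nat, 1 ≤ j → select j ps = combinations j cs := by
    intro j hj
    have := bList_select cs j
    rw [hsplit] at this
    unfold select at this ⊢
    rw [List.filterMap_append] at this
    cases j with
    | zero => omega
    | succ j' => simpa using this
  have hcnt : ∀ sc ∈ ps, sc.2 < (List.replicate (n + 1) ([] : List String)).length := by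
    intro sc hsc
    rw [hps, List.mem_map] at hsc
    obtain ⟨mask, _, rfl⟩ := hsc
    have := bStep_count_le cs n mask
    simp
    omega
  apply PySem.List.foldl_congr_mem
  intro acc c hc
  rw [List.mem_range'] at hc
  obtain ⟨i, hi, rfl⟩ := hc
  have h1 : (1 : Nat) ≤ 1 + 1 * i := by omega
  have h2 : 1 + 1 * i < n + 1 := by omega
  rw [foldB_getD ps _ _ (by simpa using h2) hcnt, hsel _ h1]
  simp
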